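-- pv_equiv track=rewrite | github.com/CAMSCSC/CIS-Extractor | WindowsExtracter.py | getTrueRanges
-- ===== SOURCE A (Python) =====
-- from typing import List, Tuple
--
-- def getTrueRanges(list: List[bool]) -> 'List[Tuple[int, int]]':
--     """ Returns the ranges of true values in a boolean list.
--     """
--     indiceRanges: 'List[Tuple[int, int]]' = []
--
--     alreadyCheckedIndices: int = -1
--     for index, item in enumerate(list):
--         # Skip if already checked
--         if index <= alreadyCheckedIndices:
--             continue
--         # Check for true values after the item if item is true
--         if item == None:
--             continue
--         if item:
--             for index2, item2 in enumerate(list[index::]):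
--                 index2 += index
--                 if item2 == None:
--                     continue
--                 # Once the value is not true, return the range up to 1 index lower than it
--                 if not item2:
--                     indiceRanges.append((index, index2 - 1))
--                     alreadyCheckedIndices = index2 - 1
--                     break
--             # if the end of the list is reached, return index to end
--             else:
--                 # Note: for-else behavior might break in future versions of python
--                 indiceRanges.append((index, len(list) - 1))
--                 return indiceRanges
--
--     return indiceRanges
-- ===== SOURCE B (Python) =====
-- from typing import List, Tuple
--
-- def getTrueRanges(list: List[bool]) -> 'List[Tuple[int, int]]':
--     """Single linear pass: track the start of the current run of True values."""
--     ranges: 'List[Tuple[int, int]]' = []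
--     start = None
--     for i, v in enumerate(list):
--         if v:
--             if start is None:
--                 start = i
--         elif start is not None:
--             ranges.append((start, i - 1))
--             start = None
--     if start is not None:
--         ranges.append((start, len(list) - 1))
--     return ranges
-- ===== Notes on version B (the rewrite author's own statement) =====
-- stated objective: faster
-- what changed: Replaced A's nested loops (rescanning the list from each run start via list[index::] plus an alreadyChecked skip counter) with a single linear pass that tracks the start index of the current True run and emits a range at each False or at end of list.
import Mathlib
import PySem

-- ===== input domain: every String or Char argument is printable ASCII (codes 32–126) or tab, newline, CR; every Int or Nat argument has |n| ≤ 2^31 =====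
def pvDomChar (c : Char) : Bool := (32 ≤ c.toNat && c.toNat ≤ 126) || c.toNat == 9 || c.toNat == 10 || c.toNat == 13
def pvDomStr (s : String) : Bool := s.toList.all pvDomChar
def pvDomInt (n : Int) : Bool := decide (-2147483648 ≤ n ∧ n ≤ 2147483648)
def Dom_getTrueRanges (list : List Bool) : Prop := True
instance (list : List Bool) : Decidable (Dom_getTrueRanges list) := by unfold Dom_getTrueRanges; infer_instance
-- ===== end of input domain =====

-- B is a single linear pass tracking the start of the current run (O(n)) instead of A's
-- rescan-from-each-run-start nested loops (O(n^2)); return values are proved identical.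

-- ===== PORT A =====
-- inner loop: 'for index2, item2 in enumerate(list[index::]): index2 += index; if not item2: break'
def pvAInner (index : Int) : List (Int × Bool) → Option Int
  | [] => none
  | (i2, item2) :: rest =>
      let index2 := i2 + index
      if !item2 then some index2 else pvAInner index rest

-- outer loop over enumerate(list), with 'alreadyCheckedIndices' skipping and the for-else early return
def pvALoop (list : List Bool) : List (Int × Bool) → List (Int × Int) → Int → List (Int × Int)
  | [], acc, _ => acc
  | (index, item) :: rest, acc, checked =>
      if index ≤ checked then pvALoop list rest acc checked
      else if item then
        match pvAInner index (PySem.List.enumerate (PySem.List.slice list (some index) none) 0) with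
        | some index2 => pvALoop list rest (acc ++ [(index, index2 - 1)]) (index2 - 1)
        | none => acc ++ [(index, (list.length : Int) - 1)]   -- for-else: append and return
      else pvALoop list rest acc checked

def getTrueRanges (list : List Bool) : List (Int × Int) :=
  pvALoop list (PySem.List.enumerate list 0) [] (-1)

-- ===== PORT B =====
-- single pass: 'start' is the index where the current run of True began (None if no run open)
def pvBLoop (n : Int) : List (Int × Bool) → Option Int → List (Int × Int) → List (Int × Int)
  | [], start, acc =>
      match start with
      | none => acc
      | some s => acc ++ [(s, n - 1)]
  | (i, v) :: rest, start, acc =>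
      if v then
        match start with
        | none => pvBLoop n rest (some i) acc
        | some _ => pvBLoop n rest start acc
      else
        match start with
        | none => pvBLoop n rest none acc
        | some s => pvBLoop n rest none (acc ++ [(s, i - 1)])

def getTrueRanges_alt (list : List Bool) : List (Int × Int) :=
  pvBLoop (list.length : Int) (PySem.List.enumerate list 0) none []

-- ===== PRECONDITION & SPEC =====
def Spec_getTrueRanges (list : List Bool) (out : List (Int × Int)) : Prop := out = getTrueRanges_alt list
instance (list : List Bool) (out : List (Int × Int)) : Decidable (Spec_getTrueRanges list out) := by unfold Spec_getTrueRanges; infer_instance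

-- ===== CLAIM (what is proved, stated in full; the proofs are below) =====
def Claim_equal_getTrueRanges : Prop := ∀ (list : List Bool), Dom_getTrueRanges list → Spec_getTrueRanges list (getTrueRanges list)

-- ===== LEMMAS AND PROOFS =====

-- one-step unfolding equations for the two loops (definitional)
lemma pvALoop_cons (list : List Bool) (index : Int) (item : Bool) (ps : List (Int × Bool))
    (acc : List (Int × Int)) (checked : Int) :
    pvALoop list ((index, item) :: ps) acc checked =
      if index ≤ checked then pvALoop list ps acc checked
      else if item then
        (match pvAInner index (PySem.List.enumerate (PySem.List.slice list (some index) none) 0) with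
         | some index2 => pvALoop list ps (acc ++ [(index, index2 - 1)]) (index2 - 1)
         | none => acc ++ [(index, (list.length : Int) - 1)])
      else pvALoop list ps acc checked := rfl

lemma pvBLoop_cons (n : Int) (i : Int) (v : Bool) (ps : List (Int × Bool))
    (start : Option Int) (acc : List (Int × Int)) :
    pvBLoop n ((i, v) :: ps) start acc =
      if v then
        (match start with
         | none => pvBLoop n ps (some i) acc
         | some _ => pvBLoop n ps start acc)
      else
        (match start with
         | none => pvBLoop n ps none acc
         | some s => pvBLoop n ps none (acc ++ [(s, i - 1)])) := rfl

-- takeWhile id covers all of l iff l is all-True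
lemma pvTakeWhile_all (l : List Bool) (h : l.all id = true) : l.takeWhile id = l := by
  induction l with
  | nil => rfl
  | cons v rest ih =>
      simp only [List.all_cons, Bool.and_eq_true, id] at h
      obtain ⟨hv, hr⟩ := h
      subst hv
      simp [List.takeWhile, ih hr]

lemma pvTakeWhile_lt (l : List Bool) (h : ¬ l.all id = true) : (l.takeWhile id).length < l.length := by
  induction l with
  | nil => simp at h
  | cons v rest ih =>
      cases v with
      | false => simp [List.takeWhile]
      | true =>
          simp only [List.all_cons, Bool.and_eq_true, id, Bool.true_and] at h
          have := ih (by simpa using h)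
          simp [List.takeWhile]
          omega

-- A's inner scan returns the (shifted) index of the first False, or none if all True
lemma pvAInner_enum (j : Int) : ∀ (l : List Bool) (s : Int),
    pvAInner j (PySem.List.enumerate l s) =
      if (l.takeWhile id).length < l.length then some (j + s + (l.takeWhile id).length) else none := by
  intro l
  induction l with
  | nil => intro s; simp [PySem.List.enumerate, pvAInner]
  | cons v rest ih =>
      intro s
      cases v with
      | false =>
          simp [PySem.List.enumerate_cons, pvAInner, List.takeWhile]
          omega
      | true =>
          have hle : (rest.takeWhile id).length ≤ rest.length :=
            List.Sublist.length_le (List.takeWhile_sublist _)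
          rw [PySem.List.enumerate_cons]
          show pvAInner j (PySem.List.enumerate rest (s + 1)) = _
          rw [ih (s + 1)]
          simp [List.takeWhile]
          split_ifs with h1 h2 <;> first
            | (simp only [Option.some.injEq]; omega)
            | omega
            | rfl

-- B with an open run over an all-True suffix closes it at n-1
lemma pvBLoop_allTrue (n : Int) : ∀ (l : List Bool) (i s : Int) (acc : List (Int × Int)),
    l.all id → pvBLoop n (PySem.List.enumerate l i) (some s) acc = acc ++ [(s, n - 1)] := by
  intro l
  induction l with
  | nil => intro i s acc _; simp [PySem.List.enumerate, pvBLoop]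
  | cons v rest ih =>
      intro i s acc h
      simp only [List.all_cons, Bool.and_eq_true, id] at h
      obtain ⟨hv, hrest⟩ := h
      subst hv
      rw [PySem.List.enumerate_cons]
      show pvBLoop n (PySem.List.enumerate rest (i + 1)) (some s) acc = _
      exact ih (i + 1) s acc hrest

-- B with an open run: runs to the first False and closes the run there
lemma pvBLoop_step (n : Int) : ∀ (l : List Bool) (i s : Int) (acc : List (Int × Int)),
    (l.takeWhile id).length < l.length →
    pvBLoop n (PySem.List.enumerate l i) (some s) acc =
      pvBLoop n (PySem.List.enumerate (l.drop ((l.takeWhile id).length + 1)) (i + (l.takeWhile id).length + 1)) none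
        (acc ++ [(s, i + (l.takeWhile id).length - 1)]) := by
  intro l
  induction l with
  | nil => intro i s acc h; simp at h
  | cons v rest ih =>
      intro i s acc h
      cases v with
      | false =>
          simp [PySem.List.enumerate_cons, pvBLoop, List.takeWhile]
      | true =>
          have hcons : (true :: rest).takeWhile id = true :: rest.takeWhile id := by
            simp [List.takeWhile]
          rw [hcons] at h ⊢
          simp only [List.length_cons] at h ⊢
          rw [PySem.List.enumerate_cons]
          show pvBLoop n (PySem.List.enumerate rest (i + 1)) (some s) acc = _
          rw [ih (i + 1) s acc (by omega)]
          rw [show (true :: rest).drop ((rest.takeWhile id).length + 1 + 1)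
                = rest.drop ((rest.takeWhile id).length + 1) from rfl]
          rw [show i + 1 + ((rest.takeWhile id).length : Int) + 1
                = i + ((((rest.takeWhile id).length + 1 : Nat)) : Int) + 1 from by push_cast; ring]
          rw [show i + 1 + ((rest.takeWhile id).length : Int) - 1
                = i + ((((rest.takeWhile id).length + 1 : Nat)) : Int) - 1 from by push_cast; ring]

-- A skips enumerate entries whose index is ≤ checked
lemma pvALoop_skip (list : List Bool) : ∀ (t : Nat) (l : List Bool) (i c : Int) (acc : List (Int × Int)),
    t ≤ l.length → i + t ≤ c + 1 →
    pvALoop list (PySem.List.enumerate l i) acc c =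
      pvALoop list (PySem.List.enumerate (l.drop t) (i + t)) acc c := by
  intro t
  induction t with
  | zero => intro l i c acc _ _; simp
  | succ t ih =>
      intro l i c acc hlen hc
      cases l with
      | nil => simp at hlen
      | cons v rest =>
          rw [PySem.List.enumerate_cons]
          simp only [pvALoop, if_pos (by push_cast at hc ⊢; omega : i ≤ c)]
          rw [ih rest (i + 1) c acc (by simpa using hlen) (by push_cast at hc ⊢; omega)]
          rw [show (v :: rest).drop (t + 1) = rest.drop t from by simp]
          congr 1
          push_cast
          ring

-- the element where takeWhile stopped (strictly inside l) is False
lemma pvDrop_takeWhile : ∀ (l : List Bool), (l.takeWhile id).length < l.length →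
    ∃ tail, l.drop ((l.takeWhile id).length) = false :: tail := by
  intro l
  induction l with
  | nil => intro h; simp at h
  | cons v rest ih =>
      intro h
      cases v with
      | false => exact ⟨rest, by simp [List.takeWhile]⟩
      | true =>
          rw [show (true :: rest).takeWhile id = true :: rest.takeWhile id from by
                simp [List.takeWhile]] at h ⊢
          simp only [List.length_cons] at h ⊢
          obtain ⟨t, ht⟩ := ih (by omega)
          exact ⟨t, by simpa using ht⟩

-- main invariant: from any fresh position j (checked < j, no open run) the two loops agree
lemma pvMain (list : List Bool) :
    ∀ (m j : Nat) (c : Int) (acc : List (Int × Int)), list.length - j ≤ m → c < (j : Int) →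
    pvALoop list (PySem.List.enumerate (list.drop j) (j : Int)) acc c =
      pvBLoop (list.length : Int) (PySem.List.enumerate (list.drop j) (j : Int)) none acc := by
  intro m
  induction m with
  | zero =>
      intro j c acc hm _
      have : list.drop j = [] := List.drop_eq_nil_of_le (by omega)
      simp [this, PySem.List.enumerate, pvALoop, pvBLoop]
  | succ m ih =>
      intro j c acc hm hc
      cases e : list.drop j with
      | nil => simp [PySem.List.enumerate, pvALoop, pvBLoop]
      | cons v rest =>
          have hjlt : j < list.length := by
            by_contra h
            simp [List.drop_eq_nil_of_le (by omega : list.length ≤ j)] at e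
          have hrest : rest = list.drop (j + 1) := by
            have := congrArg List.tail e
            simpa [List.tail_drop] using this.symm
          have hrl : rest.length = list.length - (j + 1) := by
            rw [hrest, List.length_drop]
          have hjc : ¬ ((j : Int) ≤ c) := by omega
          rw [PySem.List.enumerate_cons]
          cases v with
          | false =>
              rw [pvALoop_cons, if_neg hjc, pvBLoop_cons]
              simp only [Bool.false_eq_true, if_false]
              show pvALoop list (PySem.List.enumerate rest ((j : Int) + 1)) acc c
                = pvBLoop (list.length : Int) (PySem.List.enumerate rest ((j : Int) + 1)) none acc
              rw [show ((j : Int) + 1) = ((j + 1 : Nat) : Int) from by push_cast; ring, hrest]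
              exact ih (j + 1) c acc (by omega) (by push_cast; omega)
          | true =>
              rw [pvALoop_cons, if_neg hjc, pvBLoop_cons, if_pos rfl, if_pos rfl]
              rw [PySem.List.slice_from_natCast, e, pvAInner_enum]
              by_cases hall : (true :: rest).all id = true
              · -- all-True suffix: A's for-else return; B closes the run at n-1
                rw [if_neg (by rw [pvTakeWhile_all _ hall]; omega)]
                show acc ++ [((j : Int), (list.length : Int) - 1)]
                  = pvBLoop (list.length : Int) (PySem.List.enumerate rest ((j : Int) + 1)) (some (j : Int)) acc
                rw [pvBLoop_allTrue _ rest ((j : Int) + 1) ((j : Int)) acc (by simpa using hall)]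
              · have htw : ((true :: rest).takeWhile id).length < (true :: rest).length :=
                  pvTakeWhile_lt _ hall
                have hktsucc0 : ((true :: rest).takeWhile id).length = (rest.takeWhile id).length + 1 := by
                  simp [List.takeWhile]
                have hq : (rest.takeWhile id).length < rest.length := by
                  have h' := htw
                  rw [hktsucc0] at h'
                  simp only [List.length_cons] at h'
                  omega
                rw [if_pos htw]
                show pvALoop list (PySem.List.enumerate rest ((j : Int) + 1))
                    (acc ++ [((j : Int), (j : Int) + 0 + ((((true :: rest).takeWhile id).length : Nat) : Int) - 1)])
                    ((j : Int) + 0 + ((((true :: rest).takeWhile id).length : Nat) : Int) - 1)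
                  = pvBLoop (list.length : Int) (PySem.List.enumerate rest ((j : Int) + 1)) (some (j : Int)) acc
                rw [hktsucc0]
                -- A side: skip the rest of the run, pass the False, recurse fresh
                rw [pvALoop_skip list ((rest.takeWhile id).length) rest ((j : Int) + 1)
                      ((j : Int) + 0 + ((((rest.takeWhile id).length + 1 : Nat)) : Int) - 1)
                      (acc ++ [((j : Int), (j : Int) + 0 + ((((rest.takeWhile id).length + 1 : Nat)) : Int) - 1)])
                      (by omega) (by push_cast; omega)]
                obtain ⟨tail, htail0⟩ := pvDrop_takeWhile (true :: rest) htw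
                have htail : rest.drop ((rest.takeWhile id).length) = false :: tail := by
                  rw [hktsucc0] at htail0
                  simpa using htail0
                have htail2 : tail = list.drop (j + (rest.takeWhile id).length + 2) := by
                  have h1 : rest.drop ((rest.takeWhile id).length + 1) = tail := by
                    rw [← List.tail_drop, htail]
                    rfl
                  rw [← h1, hrest, List.drop_drop]
                  congr 1
                  omega
                rw [htail, PySem.List.enumerate_cons, pvALoop_cons,
                    if_neg (show ¬ ((j : Int) + 1 + (((rest.takeWhile id).length : Nat) : Int)
                        ≤ (j : Int) + 0 + ((((rest.takeWhile id).length + 1 : Nat)) : Int) - 1) by push_cast; omega)]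
                simp only [Bool.false_eq_true, if_false]
                rw [show (j : Int) + 1 + (((rest.takeWhile id).length : Nat) : Int) + 1
                      = ((j + (rest.takeWhile id).length + 2 : Nat) : Int) from by push_cast; ring]
                rw [htail2]
                rw [ih (j + (rest.takeWhile id).length + 2)
                      ((j : Int) + 0 + ((((rest.takeWhile id).length + 1 : Nat)) : Int) - 1)
                      (acc ++ [((j : Int), (j : Int) + 0 + ((((rest.takeWhile id).length + 1 : Nat)) : Int) - 1)])
                      (by omega) (by push_cast; omega)]
                -- B side: open the run at j, close it at the first False
                rw [pvBLoop_step _ rest ((j : Int) + 1) (j : Int) acc hq]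
                rw [show rest.drop ((rest.takeWhile id).length + 1)
                      = list.drop (j + (rest.takeWhile id).length + 2) from by
                        rw [hrest, List.drop_drop]; congr 1; omega]
                rw [show (j : Int) + 1 + (((rest.takeWhile id).length : Nat) : Int) + 1
                      = ((j + (rest.takeWhile id).length + 2 : Nat) : Int) from by push_cast; ring]
                rw [show (j : Int) + 1 + (((rest.takeWhile id).length : Nat) : Int) - 1
                      = (j : Int) + 0 + ((((rest.takeWhile id).length + 1 : Nat)) : Int) - 1 from by push_cast; ring]

-- ===== VERDICT (by name: the statement is the Claim_ definition above) =====
theorem getTrueRanges_spec : Claim_equal_getTrueRanges := by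
  intro list _
  unfold Spec_getTrueRanges getTrueRanges getTrueRanges_alt
  have h := pvMain list list.length 0 (-1) [] (by omega) (by omega)
  simpa using h
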